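-- pv_equiv track=rewrite | github.com/HuntedCode/plat-pursuit-django | trophies/services/stats_service.py | _longest_monthly_streak
-- ===== SOURCE A (Python) =====
-- def _longest_monthly_streak(sorted_year_month_tuples):
--     """Find longest run of consecutive (year, month) pairs."""
--     if not sorted_year_month_tuples:
--         return 0
--     best = 1
--     curr = 1
--     for i in range(1, len(sorted_year_month_tuples)):
--         prev_y, prev_m = sorted_year_month_tuples[i - 1]
--         curr_y, curr_m = sorted_year_month_tuples[i]
--         # Check if consecutive month
--         if (curr_y == prev_y and curr_m == prev_m + 1) or (curr_y == prev_y + 1 and prev_m == 12 and curr_m == 1):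
--             curr += 1
--         else:
--             best = max(best, curr)
--             curr = 1
--     return max(best, curr)
-- ===== SOURCE B (Python) =====
-- def _consecutive(prev, curr):
--     """True iff curr is the month right after prev."""
--     return (curr[0] == prev[0] and curr[1] == prev[1] + 1) or \
--            (curr[0] == prev[0] + 1 and prev[1] == 12 and curr[1] == 1)
--
--
-- def _rle(flags):
--     """Run-length encode a list of booleans into [(value, run_length), ...]."""
--     runs = []
--     i = 0
--     while i < len(flags):
--         b = flags[i]
--         n = 1
--         while i + n < len(flags) and flags[i + n] == b:
--             n += 1
--         runs.append((b, n))
--         i += n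
--     return runs
--
--
-- def _longest_monthly_streak(sorted_year_month_tuples):
--     """Find longest run of consecutive (year, month) pairs."""
--     if not sorted_year_month_tuples:
--         return 0
--     flags = [_consecutive(p, c)
--              for p, c in zip(sorted_year_month_tuples, sorted_year_month_tuples[1:])]
--     best = 0
--     for value, run in _rle(flags):
--         if value:
--             best = max(best, run)
--     return best + 1
-- ===== Notes on version B (the rewrite author's own statement) =====
-- stated objective: alternative
-- what changed: Replaces A's running best/curr counter scan with a wrap-around branch by a transform-then-group pass: mark each adjacent pair as consecutive or not, run-length-encode the boolean list, and return 1 plus the longest True run.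
import Mathlib
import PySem

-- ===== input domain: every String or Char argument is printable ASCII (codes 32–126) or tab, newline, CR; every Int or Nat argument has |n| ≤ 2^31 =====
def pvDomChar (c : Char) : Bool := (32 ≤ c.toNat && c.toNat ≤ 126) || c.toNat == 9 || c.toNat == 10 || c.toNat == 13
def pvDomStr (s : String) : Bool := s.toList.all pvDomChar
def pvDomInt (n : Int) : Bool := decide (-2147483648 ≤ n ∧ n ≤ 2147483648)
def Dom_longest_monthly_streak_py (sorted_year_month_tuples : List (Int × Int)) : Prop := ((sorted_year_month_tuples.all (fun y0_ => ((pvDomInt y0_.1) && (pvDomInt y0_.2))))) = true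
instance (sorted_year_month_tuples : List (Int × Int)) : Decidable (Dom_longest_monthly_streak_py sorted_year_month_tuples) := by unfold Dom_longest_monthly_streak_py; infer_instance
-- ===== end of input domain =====

-- B replaces A's running best/curr counter with a transform-then-group pass
-- (mark adjacent pairs consecutive, run-length-encode, take the longest True run + 1);
-- objective: alternative decomposition, same cost.

-- ===== PORT A =====
def longest_monthly_streak_py (sorted_year_month_tuples : List (Int × Int)) : Int :=
  if sorted_year_month_tuples = [] then 0
  else
    let r := (PySem.List.pyRange 1 (sorted_year_month_tuples.length : Int) 1).foldl
      (fun (bc : Int × Int) i =>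
        let prev := PySem.List.pyGetD sorted_year_month_tuples (i - 1) (0, 0)
        let curr := PySem.List.pyGetD sorted_year_month_tuples i (0, 0)
        if (curr.1 == prev.1 && curr.2 == prev.2 + 1) ||
           (curr.1 == prev.1 + 1 && prev.2 == 12 && curr.2 == 1)
        then (bc.1, bc.2 + 1)
        else (max bc.1 bc.2, 1)) (1, 1)
    max r.1 r.2

-- ===== PORT B =====
-- port of Source B's _consecutive
def pvConsecutive (prev curr : Int × Int) : Bool :=
  (curr.1 == prev.1 && curr.2 == prev.2 + 1) ||
  (curr.1 == prev.1 + 1 && prev.2 == 12 && curr.2 == 1)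

-- port of Source B's _rle: each outer-loop step emits one run (inner while = takeWhile) and
-- advances past it (dropWhile); ported as the equivalent structural recursion on spans
def pvRle : List Bool → List (Bool × Int)
  | [] => []
  | b :: t =>
    (b, 1 + ((t.takeWhile (fun x => x == b)).length : Int)) ::
      pvRle (t.dropWhile (fun x => x == b))
termination_by l => l.length
decreasing_by
  simpa using Nat.lt_succ_of_le (List.length_dropWhile_le _ _)

def longest_monthly_streak_py_alt (sorted_year_month_tuples : List (Int × Int)) : Int :=
  if sorted_year_month_tuples = [] then 0
  else
    let flags := (sorted_year_month_tuples.zip sorted_year_month_tuples.tail).map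
      (fun pc => pvConsecutive pc.1 pc.2)
    (pvRle flags).foldl (fun best kn => if kn.1 then max best kn.2 else best) 0 + 1

-- ===== PRECONDITION & SPEC =====
def Spec_longest_monthly_streak_py (sorted_year_month_tuples : List (Int × Int)) (out : Int) : Prop := out = longest_monthly_streak_py_alt sorted_year_month_tuples
instance (sorted_year_month_tuples : List (Int × Int)) (out : Int) : Decidable (Spec_longest_monthly_streak_py sorted_year_month_tuples out) := by unfold Spec_longest_monthly_streak_py; infer_instance

-- ===== CLAIM (what is proved, stated in full; the proofs are below) =====
def Claim_equal_longest_monthly_streak_py : Prop := ∀ (sorted_year_month_tuples : List (Int × Int)), Dom_longest_monthly_streak_py sorted_year_month_tuples → Spec_longest_monthly_streak_py sorted_year_month_tuples (longest_monthly_streak_py sorted_year_month_tuples)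

-- ===== LEMMAS AND PROOFS =====

-- length of the leading run of `true`
def pvLead : List Bool → Int
  | [] => 0
  | true :: t => 1 + pvLead t
  | false :: _ => 0

-- longest run of `true` after the leading run
def pvTailMax : List Bool → Int
  | [] => 0
  | true :: t => pvTailMax t
  | false :: t => max (pvLead t) (pvTailMax t)

-- abstract form of A's inner loop on the flag list (best dropped into pvLoop)
def pvF : List Bool → Int → Int
  | [], c => c
  | true :: t, c => pvF t (c + 1)
  | false :: t, c => max c (pvF t 1)

def pvLoop : List Bool → Int → Int → Int
  | [], b, c => max b c
  | true :: t, b, c => pvLoop t b (c + 1)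
  | false :: t, b, c => pvLoop t (max b c) 1

-- foldr form of B's best-of-runs fold
def pvMT : List (Bool × Int) → Int
  | [] => 0
  | (true, n) :: r => max n (pvMT r)
  | (false, _) :: r => pvMT r

theorem pvLead_nonneg : ∀ fl : List Bool, 0 ≤ pvLead fl
  | [] => by simp [pvLead]
  | true :: t => by have := pvLead_nonneg t; simp [pvLead]; omega
  | false :: t => by simp [pvLead]

theorem pvTailMax_nonneg : ∀ fl : List Bool, 0 ≤ pvTailMax fl
  | [] => by simp [pvTailMax]
  | true :: t => by have := pvTailMax_nonneg t; simpa [pvTailMax]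
  | false :: t => by have := pvTailMax_nonneg t; have := pvLead_nonneg t; simp [pvTailMax]; omega

theorem pvLead_takeWhile : ∀ t : List Bool,
    ((t.takeWhile (fun x => x == true)).length : Int) = pvLead t
  | [] => by simp [pvLead]
  | true :: t => by
      have := pvLead_takeWhile t
      simp [List.takeWhile, pvLead] at *; omega
  | false :: t => by simp [List.takeWhile, pvLead]

theorem pvTailMax_dropTrue : ∀ t : List Bool,
    pvTailMax t = max (pvLead (t.dropWhile (fun x => x == true)))
                      (pvTailMax (t.dropWhile (fun x => x == true)))
  | [] => by simp [pvLead, pvTailMax]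
  | true :: t => by
      have := pvTailMax_dropTrue t
      simpa [List.dropWhile, pvTailMax]
  | false :: t => by
      have := pvLead_nonneg t; have := pvTailMax_nonneg t
      simp [List.dropWhile, pvLead, pvTailMax]; omega

theorem pvM_dropFalse : ∀ t : List Bool,
    max (pvLead t) (pvTailMax t)
      = max (pvLead (t.dropWhile (fun x => x == false)))
            (pvTailMax (t.dropWhile (fun x => x == false)))
  | [] => by simp
  | true :: t => by simp [List.dropWhile]
  | false :: t => by
      have := pvM_dropFalse t
      have := pvLead_nonneg t; have := pvTailMax_nonneg t
      simp [List.dropWhile, pvLead, pvTailMax] at *; omega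

theorem pvMT_pvRle : ∀ fl : List Bool, pvMT (pvRle fl) = max (pvLead fl) (pvTailMax fl) := by
  intro fl
  induction fl using pvRle.induct with
  | case1 => simp [pvRle, pvMT, pvLead, pvTailMax]
  | case2 b t ih =>
    cases b with
    | true =>
      rw [pvRle]
      simp only [pvMT, ih, pvLead_takeWhile, pvLead, pvTailMax]
      rw [pvTailMax_dropTrue t]
    | false =>
      rw [pvRle]
      have h := pvM_dropFalse t
      have := pvLead_nonneg t; have := pvTailMax_nonneg t
      simp only [pvMT, ih, pvLead, pvTailMax]
      omega

theorem pvFoldl_eq_pvMT : ∀ (r : List (Bool × Int)) (a : Int), 0 ≤ a →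
    r.foldl (fun best kn => if kn.1 then max best kn.2 else best) a = max a (pvMT r)
  | [], a, ha => by simp [pvMT]; omega
  | (k, n) :: r, a, ha => by
    cases k with
    | true =>
      have := pvFoldl_eq_pvMT r (max a n) (by omega)
      simp [pvMT, List.foldl_cons] at *; omega
    | false =>
      have := pvFoldl_eq_pvMT r a ha
      simp [pvMT, List.foldl_cons] at *; omega

theorem pvF_eq : ∀ (fl : List Bool) (c : Int), 1 ≤ c →
    pvF fl c = max (c + pvLead fl) (1 + pvTailMax fl)
  | [], c, hc => by simp [pvF, pvLead, pvTailMax]; omega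
  | true :: t, c, hc => by
    have := pvF_eq t (c + 1) (by omega)
    simp [pvF, pvLead, pvTailMax] at *; omega
  | false :: t, c, hc => by
    have := pvF_eq t 1 (by omega)
    have := pvLead_nonneg t
    simp [pvF, pvLead, pvTailMax] at *; omega

theorem pvLoop_eq : ∀ (fl : List Bool) (b c : Int), pvLoop fl b c = max b (pvF fl c)
  | [], b, c => by simp [pvLoop, pvF]
  | true :: t, b, c => by
    have := pvLoop_eq t b (c + 1)
    simp [pvLoop, pvF] at *; omega
  | false :: t, b, c => by
    have := pvLoop_eq t (max b c) 1
    simp [pvLoop, pvF] at *; omega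

-- A's paired fold equals pvLoop on the flag list
theorem pvFold_pairs_eq_pvLoop :
    ∀ (ps : List ((Int × Int) × (Int × Int))) (b c : Int),
    (let q := ps.foldl (fun (bc : Int × Int) pc =>
        if pvConsecutive pc.1 pc.2 then (bc.1, bc.2 + 1) else (max bc.1 bc.2, 1)) (b, c);
      max q.1 q.2)
    = pvLoop (ps.map (fun pc => pvConsecutive pc.1 pc.2)) b c
  | [], b, c => by simp [pvLoop]
  | p :: ps, b, c => by
    by_cases h : pvConsecutive p.1 p.2
    · have := pvFold_pairs_eq_pvLoop ps b (c + 1)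
      simpa [List.foldl_cons, h, pvLoop]
    · have := pvFold_pairs_eq_pvLoop ps (max b c) 1
      simpa [List.foldl_cons, h, pvLoop]

-- A's index range maps to the list of adjacent pairs
theorem pvRange_map_pairs (xs : List (Int × Int)) (hne : xs ≠ []) :
    (PySem.List.pyRange 1 (xs.length : Int) 1).map
      (fun i => (PySem.List.pyGetD xs (i - 1) ((0 : Int), (0 : Int)),
                 PySem.List.pyGetD xs i ((0 : Int), (0 : Int))))
      = xs.zip xs.tail := by
  have hlen : 0 < xs.length := List.length_pos_iff.mpr hne
  apply List.ext_getElem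
  · simp [PySem.List.length_pyRange_one, List.length_zip, List.length_tail]
  · intro k h1 h2
    have hk : k < xs.length - 1 := by
      simpa [PySem.List.length_pyRange_one] using (by
        have := h1
        simp [List.length_map, PySem.List.length_pyRange_one] at this
        omega : k < xs.length - 1)
    have hk1 : k < xs.length := by omega
    have hk2 : k + 1 < xs.length := by omega
    have e2 : (1 : Int) + (k : Int) = (((k + 1 : Nat)) : Int) := by push_cast; ring
    have e3 : (((k + 1 : Nat)) : Int) - 1 = ((k : Nat) : Int) := by push_cast; ring
    simp only [List.getElem_map, PySem.List.getElem_pyRange_one, e2, e3,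
      PySem.List.pyGetD_natCast, List.getElem_zip, List.getElem_tail]
    rw [List.getD_eq_getElem _ _ hk1, List.getD_eq_getElem _ _ hk2]

-- ===== VERDICT (by name: the statement is the Claim_ definition above) =====
theorem longest_monthly_streak_py_spec : Claim_equal_longest_monthly_streak_py := by
  unfold Claim_equal_longest_monthly_streak_py
  intro xs _
  unfold Spec_longest_monthly_streak_py
  unfold longest_monthly_streak_py longest_monthly_streak_py_alt
  by_cases hne : xs = []
  · simp [hne]
  · simp only [hne, if_false]
    have hfold := pvRange_map_pairs xs hne
    -- rewrite A's indexed fold as a fold over adjacent pairs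
    rw [show
      (PySem.List.pyRange 1 (xs.length : Int) 1).foldl
        (fun (bc : Int × Int) i =>
          let prev := PySem.List.pyGetD xs (i - 1) ((0 : Int), (0 : Int))
          let curr := PySem.List.pyGetD xs i ((0 : Int), (0 : Int))
          if (curr.1 == prev.1 && curr.2 == prev.2 + 1) ||
             (curr.1 == prev.1 + 1 && prev.2 == 12 && curr.2 == 1)
          then (bc.1, bc.2 + 1)
          else (max bc.1 bc.2, 1)) ((1 : Int), (1 : Int))
        = (xs.zip xs.tail).foldl
            (fun (bc : Int × Int) pc =>
              if pvConsecutive pc.1 pc.2 then (bc.1, bc.2 + 1) else (max bc.1 bc.2, 1))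
            ((1 : Int), (1 : Int)) from by
      rw [← hfold, List.foldl_map]; rfl]
    rw [pvFold_pairs_eq_pvLoop (xs.zip xs.tail) 1 1, pvLoop_eq,
        pvFoldl_eq_pvMT _ 0 le_rfl, pvMT_pvRle, pvF_eq _ 1 le_rfl]
    have := pvLead_nonneg ((xs.zip xs.tail).map (fun pc => pvConsecutive pc.1 pc.2))
    have := pvTailMax_nonneg ((xs.zip xs.tail).map (fun pc => pvConsecutive pc.1 pc.2))
    omega
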